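-- pv_equiv track=rewrite | github.com/APrinceGPT/intellicket | CSDAIv2/security.py | sanitize_process_name
-- ===== SOURCE A (Python) =====
-- def sanitize_process_name(process_name: str) -> str:
--     """
--     Sanitize process names to prevent injection attacks
--
--     Args:
--         process_name: Raw process name from XML
--
--     Returns:
--         str: Sanitized process name
--     """
--     if not process_name:
--         return ""
--
--     # Remove potentially dangerous characters
--     dangerous_chars = ['<', '>', '"', "'", '&', '\n', '\r', '\t']
--     sanitized = process_name
--
--     for char in dangerous_chars:
--         sanitized = sanitized.replace(char, '')
--
--     # Limit length to prevent buffer overflow attacks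
--     return sanitized[:255]
-- ===== SOURCE B (Python) =====
-- def sanitize_process_name(process_name: str) -> str:
--     """One fused loop with an accumulator: filter out dangerous characters and
--     stop as soon as 255 characters have been kept (no replace passes, no slice)."""
--     if not process_name:
--         return ""
--     dangerous = '<>"\'&\n\r\t'
--     out = []
--     for c in process_name:
--         if len(out) == 255:
--             break
--         if c not in dangerous:
--             out.append(c)
--     return ''.join(out)
-- ===== Notes on version B (the rewrite author's own statement) =====
-- stated objective: alternative
-- what changed: Replaces A's eight sequential str.replace passes followed by a slice with one fused accumulator loop that filters each character and breaks early once 255 characters are kept.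
import Mathlib
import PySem

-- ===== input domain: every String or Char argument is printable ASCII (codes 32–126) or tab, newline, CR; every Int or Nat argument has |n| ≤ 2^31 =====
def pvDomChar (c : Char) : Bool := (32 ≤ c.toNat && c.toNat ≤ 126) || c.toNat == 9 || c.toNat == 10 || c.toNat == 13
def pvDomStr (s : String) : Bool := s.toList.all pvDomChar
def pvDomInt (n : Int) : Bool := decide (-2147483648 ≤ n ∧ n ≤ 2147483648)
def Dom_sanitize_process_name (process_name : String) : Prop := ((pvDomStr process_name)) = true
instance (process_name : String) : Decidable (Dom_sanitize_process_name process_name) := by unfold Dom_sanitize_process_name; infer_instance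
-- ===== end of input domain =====

-- B replaces A's eight sequential .replace passes + slice with one fused accumulator
-- loop that stops early after 255 kept characters; objective: alternative.

-- ===== PORT A =====
-- A: eight sequential replace passes (each dangerous char removed by str.replace), then [:255].
def sanitize_process_name (process_name : String) : String :=
  if process_name.toList.isEmpty then "" else
    let dangerous_chars : List Char := ['<', '>', '"', '\'', '&', '\n', '\r', '\t']
    let sanitized := dangerous_chars.foldl
      (fun acc c => PySem.Chars.replace acc [c] []) process_name.toList
    String.ofList (PySem.List.slice sanitized none (some 255))

-- ===== PORT B =====
-- B helper: the fused loop — out is the reversed accumulator, k its length;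
-- break when 255 kept, skip dangerous chars, otherwise append.
def pvSanGo (l : List Char) (k : Nat) (out : List Char) : List Char :=
  match l with
  | [] => out.reverse
  | c :: t =>
    if k = 255 then out.reverse
    else if ("<>\"'&\n\r\t".toList).contains c then pvSanGo t k out
    else pvSanGo t (k + 1) (c :: out)

def sanitize_process_name_alt (process_name : String) : String :=
  if process_name.toList.isEmpty then "" else
    String.ofList (pvSanGo process_name.toList 0 [])

-- ===== PRECONDITION & SPEC =====
def Spec_sanitize_process_name (process_name : String) (out : String) : Prop := out = sanitize_process_name_alt process_name
instance (process_name : String) (out : String) : Decidable (Spec_sanitize_process_name process_name out) := by unfold Spec_sanitize_process_name; infer_instance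

-- ===== CLAIM (what is proved, stated in full; the proofs are below) =====
def Claim_equal_sanitize_process_name : Prop := ∀ (process_name : String), Dom_sanitize_process_name process_name → Spec_sanitize_process_name process_name (sanitize_process_name process_name)

-- ===== LEMMAS AND PROOFS =====

-- str.replace(c, '') removes exactly the occurrences of c: it is a filter.
theorem replace_go_single (c : Char) :
    ∀ (fuel : Nat) (l acc : List Char), l.length ≤ fuel →
      PySem.Chars.replace.go [c] [] fuel l acc = acc.reverse ++ l.filter (fun x => x != c) := by
  intro fuel
  induction fuel with
  | zero =>
    intro l acc h
    have : l = [] := List.eq_nil_of_length_eq_zero (Nat.le_zero.mp h)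
    subst this
    simp [PySem.Chars.replace.go]
  | succ n ih =>
    intro l acc h
    cases l with
    | nil => simp [PySem.Chars.replace.go]
    | cons x t =>
      simp only [PySem.Chars.replace.go]
      simp only [List.length_cons] at h
      by_cases hx : x = c
      · subst hx
        have hp : List.isPrefixOf [x] (x :: t) = true := by simp [List.isPrefixOf]
        rw [if_pos hp]
        simp only [List.length_cons, List.length_nil, List.drop_succ_cons, List.drop_zero,
          List.reverse_nil, List.nil_append]
        rw [ih t acc (by omega)]
        simp [List.filter]
      · have hp : List.isPrefixOf [c] (x :: t) = false := by
          simp [List.isPrefixOf]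
          exact fun hcx => hx hcx.symm
        rw [if_neg (by simp [hp])]
        rw [ih t (x :: acc) (by omega)]
        have hb : (x != c) = true := by simp [hx]
        simp [List.filter, hb]

theorem replace_single_eq_filter (c : Char) (l : List Char) :
    PySem.Chars.replace l [c] [] = l.filter (fun x => x != c) := by
  have h := replace_go_single c l.length l [] (Nat.le_refl _)
  simpa [PySem.Chars.replace] using h

-- Folding single-char removals over a list of chars is one filter against membership.
theorem foldl_replace_eq_filter (ds : List Char) (l : List Char) :
    ds.foldl (fun acc c => PySem.Chars.replace acc [c] []) l
      = l.filter (fun x => !(ds.contains x)) := by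
  induction ds generalizing l with
  | nil => simp
  | cons d ds ih =>
    simp only [List.foldl_cons]
    rw [replace_single_eq_filter, ih, List.filter_filter]
    apply List.filter_congr
    intro x _
    simp only [List.contains_cons, Bool.not_or, bne]
    exact Bool.and_comm _ _

-- The fused loop equals filter-then-take of the remaining budget.
theorem pvSanGo_eq (l : List Char) : ∀ (k : Nat) (out : List Char), k ≤ 255 →
    pvSanGo l k out
      = out.reverse ++ (l.filter (fun c => !(("<>\"'&\n\r\t".toList).contains c))).take (255 - k) := by
  induction l with
  | nil => intro k out _; simp [pvSanGo]
  | cons c t ih =>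
    intro k out hk
    by_cases h255 : k = 255
    · subst h255
      simp [pvSanGo]
    · rw [pvSanGo, if_neg h255]
      by_cases hd : (("<>\"'&\n\r\t".toList).contains c) = true
      · rw [if_pos hd, ih k out hk]
        have hb : (!(("<>\"'&\n\r\t".toList).contains c)) = false := by
          rw [hd]; rfl
        simp only [List.filter_cons, hb, Bool.false_eq_true, if_false]
      · rw [if_neg hd, ih (k + 1) (c :: out) (by omega)]
        have hb : (!(("<>\"'&\n\r\t".toList).contains c)) = true := by
          simpa using hd
        have harith : 255 - k = (255 - (k + 1)) + 1 := by omega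
        simp only [List.filter_cons, hb, if_pos, List.reverse_cons, List.append_assoc,
          List.singleton_append, harith, List.take_succ_cons]

-- ===== VERDICT (by name: the statement is the Claim_ definition above) =====
theorem sanitize_process_name_spec : Claim_equal_sanitize_process_name := by
  intro s _
  unfold Spec_sanitize_process_name sanitize_process_name sanitize_process_name_alt
  by_cases h : s.toList.isEmpty
  · simp [h]
  · simp only [h, Bool.false_eq_true, if_false]
    rw [foldl_replace_eq_filter]
    rw [PySem.List.slice_to _ (by norm_num : (0:Int) ≤ 255)]
    rw [pvSanGo_eq _ 0 [] (by omega)]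
    have hds : ("<>\"'&\n\r\t".toList) = ['<', '>', '"', '\'', '&', '\n', '\r', '\t'] := by decide
    simp [hds]
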